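-- pv_equiv track=rewrite | github.com/zbingf/pyadams | pyadams/file/bdf_transient_modal.py | create_rbe2_str
-- ===== SOURCE A (Python) =====
-- def str_list_change(prefix, list1, nlen):
--     """
--         将数据转化为规则多行数据
--         prefix 前缀
--         list1   单列数据
--         nlen    每行数据长度
--     """
--     isStart = True
--     list_2  = []
--     for loc, value in enumerate(list1):
--         if divmod(loc, nlen)[1] == 0:
--             if isStart:
--                 line, isStart = [value], False
--                 continue
--             list_2.append(line)
--             line = [value]
--             continue
--         line.append(value)
--     list_2.append(line)
--
--     strs = [prefix + ','.join([str(nid) for nid in line]) for line in list_2]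
--
--     return '\n'.join(strs)
--
-- def create_rbe2_str(rbe2_id, grid_id_tar, dof, grid_ids):
--     """
--         rbe2_id     rbe2的ID号
--         grid_id_tar 目标点ID号
--         dof         自由度     '123456'表示全约束
--         grid_ids    各个连接点ID号 [1,2,...]
--     """
--     if isinstance(grid_ids, int):grid_ids = [grid_ids]
--
--     if len(grid_ids)>2:
--         # 超过两个接点
--         line1 = f'RBE2,{rbe2_id},{grid_id_tar},{dof},' + \
--                 ','.join([str(grid_id) for grid_id in grid_ids[:2]])
--
--         line2 = str_list_change('+,', grid_ids[2:], 4)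
--
--         return '\n'.join([line1, line2])
--     else:
--         line1 = f'RBE2,{rbe2_id},{grid_id_tar},{dof},' + \
--                 ','.join([str(grid_id) for grid_id in grid_ids])
--
--         return line1
-- ===== SOURCE B (Python) =====
-- def create_rbe2_str(rbe2_id, grid_id_tar, dof, grid_ids):
--     """Same card, built in one pass: header line plus index-stepped 4-wide slices of the remainder."""
--     if isinstance(grid_ids, int):
--         grid_ids = [grid_ids]
--     lines = [f'RBE2,{rbe2_id},{grid_id_tar},{dof},'
--              + ','.join(str(g) for g in grid_ids[:2])]
--     rest = grid_ids[2:]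
--     for i in range(0, len(rest), 4):
--         lines.append('+,' + ','.join(str(g) for g in rest[i:i+4]))
--     return '\n'.join(lines)
-- ===== Notes on version B (the rewrite author's own statement) =====
-- stated objective: simpler
-- what changed: Replaces A's helper with its modulo/start-flag accumulator loop (plus a final join over a list-of-lists) by directly emitting continuation lines from index-stepped 4-wide slices of grid_ids[2:] in a single pass, with no branch between the <=2 and >2 cases.
import Mathlib
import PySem

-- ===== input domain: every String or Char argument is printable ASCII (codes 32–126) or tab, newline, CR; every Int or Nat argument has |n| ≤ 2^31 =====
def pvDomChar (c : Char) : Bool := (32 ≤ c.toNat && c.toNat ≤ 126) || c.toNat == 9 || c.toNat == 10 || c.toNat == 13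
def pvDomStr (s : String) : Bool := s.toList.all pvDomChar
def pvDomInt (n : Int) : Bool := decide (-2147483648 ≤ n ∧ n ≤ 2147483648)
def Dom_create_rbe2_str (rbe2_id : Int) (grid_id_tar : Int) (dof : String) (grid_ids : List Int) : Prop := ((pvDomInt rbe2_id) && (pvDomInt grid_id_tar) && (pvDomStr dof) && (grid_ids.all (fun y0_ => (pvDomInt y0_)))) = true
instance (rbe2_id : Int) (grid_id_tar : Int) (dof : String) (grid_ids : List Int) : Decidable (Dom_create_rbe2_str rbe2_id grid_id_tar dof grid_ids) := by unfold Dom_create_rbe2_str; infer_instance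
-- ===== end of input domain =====

-- B replaces A's element-by-element modulo/start-flag accumulation helper by building the
-- continuation lines directly from index-stepped 4-wide slices of grid_ids[2:] (objective: simpler).

-- ===== PORT A =====
-- port of str_list_change; divmod(loc, nlen)[1] is ported as PySem.Int.mod, exact since the
-- only call site passes nlen = 4 ≠ 0 (Python's divmod raises only for nlen = 0).
def str_list_change (prefix_ : String) (list1 : List Int) (nlen : Int) : String :=
  let st := (PySem.List.enumerate list1).foldl
    (fun (s : Bool × List Int × List (List Int)) (p : Int × Int) =>
      if PySem.Int.mod p.1 nlen = 0 then
        if s.1 then (false, [p.2], s.2.2)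
        else (false, [p.2], s.2.2 ++ [s.2.1])
      else (s.1, s.2.1 ++ [p.2], s.2.2))
    (true, ([] : List Int), ([] : List (List Int)))
  let list_2 := st.2.2 ++ [st.2.1]
  PySem.Str.join "\n"
    (list_2.map (fun line => prefix_ ++ PySem.Str.join "," (line.map PySem.Int.toStr)))

-- the isinstance(grid_ids, int) coercion is vacuous under the type convention (grid_ids : List Int)
def create_rbe2_str (rbe2_id : Int) (grid_id_tar : Int) (dof : String) (grid_ids : List Int) : String :=
  if grid_ids.length > 2 then
    let line1 := "RBE2," ++ PySem.Int.toStr rbe2_id ++ "," ++ PySem.Int.toStr grid_id_tar ++ ","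
      ++ dof ++ ","
      ++ PySem.Str.join "," ((PySem.List.slice grid_ids none (some 2)).map PySem.Int.toStr)
    let line2 := str_list_change "+," (PySem.List.slice grid_ids (some 2) none) 4
    PySem.Str.join "\n" [line1, line2]
  else
    "RBE2," ++ PySem.Int.toStr rbe2_id ++ "," ++ PySem.Int.toStr grid_id_tar ++ ","
      ++ dof ++ ","
      ++ PySem.Str.join "," (grid_ids.map PySem.Int.toStr)

-- ===== PORT B =====
def create_rbe2_str_alt (rbe2_id : Int) (grid_id_tar : Int) (dof : String) (grid_ids : List Int) : String :=
  let line1 := "RBE2," ++ PySem.Int.toStr rbe2_id ++ "," ++ PySem.Int.toStr grid_id_tar ++ ","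
    ++ dof ++ ","
    ++ PySem.Str.join "," ((PySem.List.slice grid_ids none (some 2)).map PySem.Int.toStr)
  let rest := PySem.List.slice grid_ids (some 2) none
  let lines := (PySem.List.pyRange 0 (rest.length : Int) 4).foldl
    (fun acc i => acc ++
      ["+," ++ PySem.Str.join ","
        ((PySem.List.slice rest (some i) (some (i + 4))).map PySem.Int.toStr)])
    [line1]
  PySem.Str.join "\n" lines

-- ===== PRECONDITION & SPEC =====
def Spec_create_rbe2_str (rbe2_id : Int) (grid_id_tar : Int) (dof : String) (grid_ids : List Int) (out : String) : Prop := out = create_rbe2_str_alt rbe2_id grid_id_tar dof grid_ids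
instance (rbe2_id : Int) (grid_id_tar : Int) (dof : String) (grid_ids : List Int) (out : String) : Decidable (Spec_create_rbe2_str rbe2_id grid_id_tar dof grid_ids out) := by unfold Spec_create_rbe2_str; infer_instance

-- ===== CLAIM (what is proved, stated in full; the proofs are below) =====
def Claim_equal_create_rbe2_str : Prop := ∀ (rbe2_id : Int) (grid_id_tar : Int) (dof : String) (grid_ids : List Int), Dom_create_rbe2_str rbe2_id grid_id_tar dof grid_ids → Spec_create_rbe2_str rbe2_id grid_id_tar dof grid_ids (create_rbe2_str rbe2_id grid_id_tar dof grid_ids)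

-- ===== LEMMAS AND PROOFS =====

-- the common chunking both loops compute: successive 4-wide blocks
def chunks4 (l : List Int) : List (List Int) :=
  if hnil : l = [] then [] else l.take 4 :: chunks4 (l.drop 4)
termination_by l.length
decreasing_by
  have : 0 < l.length := List.length_pos_iff.mpr hnil
  simp [List.length_drop]; omega

-- A's loop body (with nlen = 4) and the post-loop packaging
def stepA : (Bool × List Int × List (List Int)) → (Int × Int) → (Bool × List Int × List (List Int)) :=
  fun s p =>
    if PySem.Int.mod p.1 4 = 0 then
      if s.1 then (false, [p.2], s.2.2)
      else (false, [p.2], s.2.2 ++ [s.2.1])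
    else (s.1, s.2.1 ++ [p.2], s.2.2)

def outA (st : Bool × List Int × List (List Int)) : List (List Int) := st.2.2 ++ [st.2.1]

lemma chunks4_nil : chunks4 [] = [] := by rw [chunks4]; rfl

lemma chunks4_ne_nil (l : List Int) (h : l ≠ []) :
    chunks4 l = l.take 4 :: chunks4 (l.drop 4) := by rw [chunks4]; simp [h]

lemma stepA_mod_zero_true (line : List Int) (acc : List (List Int)) (i v : Int)
    (h : PySem.Int.mod i 4 = 0) : stepA (true, line, acc) (i, v) = (false, [v], acc) := by
  unfold stepA; rw [if_pos h]; rfl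

lemma stepA_mod_zero_false (line : List Int) (acc : List (List Int)) (i v : Int)
    (h : PySem.Int.mod i 4 = 0) :
    stepA (false, line, acc) (i, v) = (false, [v], acc ++ [line]) := by
  unfold stepA; rw [if_pos h]; rfl

-- elements whose index is not a multiple of 4 are just appended to the current line
lemma tailA (t : List Int) : ∀ (m : Nat), (∀ i, m ≤ i → i < m + t.length → i % 4 ≠ 0) →
    ∀ (b : Bool) (line : List Int) (acc : List (List Int)),
    (PySem.List.enumerate t (m : Int)).foldl stepA (b, line, acc) = (b, line ++ t, acc) := by
  induction t with
  | nil => intro m _ b line acc; simp [PySem.List.enumerate_nil]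
  | cons v t ih =>
    intro m hm b line acc
    rw [PySem.List.enumerate_cons]
    have h0 : (m : Int) % 4 ≠ 0 := by
      have := hm m (le_refl m) (by simp)
      omega
    have hmod : PySem.Int.mod (m : Int) 4 ≠ 0 := by
      rw [show (4 : Int) = ((4 : Nat) : Int) from by norm_num, PySem.Int.mod_natCast]
      exact_mod_cast hm m (le_refl m) (by simp)
    have : ((m : Int) + 1) = ((m + 1 : Nat) : Int) := by push_cast; ring
    rw [List.foldl_cons]
    have hstep : stepA (b, line, acc) ((m : Int), v) = (b, line ++ [v], acc) := by
      unfold stepA; rw [if_neg hmod]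
    rw [hstep, this, ih (m + 1) (by intro i h1 h2; exact hm i (by omega) (by simp at h2 ⊢; omega)) b (line ++ [v]) acc]
    simp

lemma chunkA : ∀ (n : Nat) (l : List Int), l.length ≤ n → l ≠ [] →
    ∀ (k : Nat) (line : List Int) (acc : List (List Int)),
    outA ((PySem.List.enumerate l ((4 * k : Nat) : Int)).foldl stepA (false, line, acc))
      = acc ++ [line] ++ chunks4 l := by
  intro n
  induction n with
  | zero => intro l hl hne; cases l <;> simp_all
  | succ n ih =>
    intro l hl hne k line acc
    obtain ⟨v, t, rfl⟩ := List.exists_cons_of_ne_nil hne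
    have hsplit : v :: t = (v :: t.take 3) ++ t.drop 3 := by simp
    conv_lhs => rw [hsplit]
    rw [PySem.List.enumerate_append, List.foldl_append, PySem.List.enumerate_cons, List.foldl_cons]
    rw [stepA_mod_zero_false _ _ _ _ (by rw [show (4 : Int) = ((4 : Nat) : Int) from by norm_num, PySem.Int.mod_natCast]; simp [Nat.mul_mod_right])]
    rw [show ((4 * k : Nat) : Int) + 1 = ((4 * k + 1 : Nat) : Int) from by push_cast; ring]
    rw [tailA (t.take 3) (4 * k + 1)
      (by intro i h1 h2; simp at h2; omega) false [v] (acc ++ [line])]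
    by_cases hrnil : t.drop 3 = []
    · rw [hrnil]
      simp only [PySem.List.enumerate_nil, List.foldl_nil]
      rw [chunks4_ne_nil _ hne]
      simp [outA, hrnil, chunks4_nil]
    · have htlen : t.length > 3 := by
        by_contra hle
        exact hrnil (List.drop_eq_nil_of_le (by omega))
      have hlen4 : ((v :: t.take 3 : List Int)).length = 4 := by
        simp [List.length_take]; omega
      rw [show ((4 * k : Nat) : Int) + (((v :: t.take 3 : List Int)).length : Int)
          = ((4 * (k + 1) : Nat) : Int) from by rw [hlen4]; push_cast; ring]
      rw [show ([v] ++ t.take 3 : List Int) = v :: t.take 3 from by simp]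
      rw [ih (t.drop 3) (by simp at hl ⊢; omega) hrnil (k + 1) (v :: t.take 3) (acc ++ [line])]
      rw [chunks4_ne_nil _ hne]
      simp

-- the whole helper loop of A computes exactly the 4-chunks
lemma loopA (l : List Int) (hne : l ≠ []) :
    outA ((PySem.List.enumerate l).foldl stepA (true, [], [])) = chunks4 l := by
  obtain ⟨v, t, rfl⟩ := List.exists_cons_of_ne_nil hne
  have hsplit : v :: t = (v :: t.take 3) ++ t.drop 3 := by simp
  show outA ((PySem.List.enumerate (v :: t) 0).foldl stepA (true, [], [])) = chunks4 (v :: t)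
  conv_lhs => rw [hsplit]
  rw [PySem.List.enumerate_append, List.foldl_append, PySem.List.enumerate_cons, List.foldl_cons]
  rw [stepA_mod_zero_true _ _ _ _ (by decide)]
  rw [show (0 : Int) + 1 = ((0 + 1 : Nat) : Int) from by norm_num]
  rw [tailA (t.take 3) (0 + 1) (by intro i h1 h2; simp at h2; omega) false [v] []]
  by_cases hrnil : t.drop 3 = []
  · rw [hrnil]
    simp only [PySem.List.enumerate_nil, List.foldl_nil]
    rw [chunks4_ne_nil _ hne]
    simp [outA, hrnil, chunks4_nil]
  · have htlen : t.length > 3 := by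
      by_contra hle
      exact hrnil (List.drop_eq_nil_of_le (by omega))
    have hlen4 : ((v :: t.take 3 : List Int)).length = 4 := by
      simp [List.length_take]; omega
    rw [show (0 : Int) + (((v :: t.take 3 : List Int)).length : Int)
        = ((4 * 1 : Nat) : Int) from by rw [hlen4]; norm_num]
    rw [show ([v] ++ t.take 3 : List Int) = v :: t.take 3 from by simp]
    rw [chunkA (t.drop 3).length (t.drop 3) (le_refl _) hrnil 1 (v :: t.take 3) []]
    rw [chunks4_ne_nil _ hne]
    simp

-- number of 4-chunks
def cnt4 (L : Nat) : Nat := (L + 3) / 4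

lemma cnt4_zero : cnt4 0 = 0 := by simp [cnt4]

lemma cnt4_succ (L : Nat) (h : 0 < L) : cnt4 L = cnt4 (L - 4) + 1 := by
  unfold cnt4
  rcases Nat.lt_or_ge L 5 with h5 | h5
  · interval_cases L <;> simp
  · have h1 : L + 3 = (L - 1) + 4 := by omega
    have h2 : L - 4 + 3 = L - 1 := by omega
    rw [h1, h2, Nat.add_div_right _ (by norm_num)]

-- B's index-stepped slices are the same 4-chunks
lemma sliceB : ∀ (n : Nat) (rest : List Int), rest.length ≤ n →
    (List.range (cnt4 rest.length)).map (fun k => (rest.drop (4 * k)).take 4) = chunks4 rest := by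
  intro n
  induction n with
  | zero =>
    intro rest h
    have hn : rest = [] := List.length_eq_zero_iff.mp (by omega)
    subst hn
    simp [cnt4_zero, chunks4_nil]
  | succ n ih =>
    intro rest h
    by_cases hnil : rest = []
    · subst hnil; simp [cnt4_zero, chunks4_nil]
    · have hpos : 0 < rest.length := List.length_pos_iff.mpr hnil
      rw [cnt4_succ _ hpos, List.range_succ_eq_map, List.map_cons, List.map_map]
      rw [chunks4_ne_nil _ hnil]
      rw [show (rest.drop (4 * 0)).take 4 = rest.take 4 from by simp]
      congr 1
      have hih := ih (rest.drop 4) (by rw [List.length_drop]; omega)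
      rw [List.length_drop] at hih
      rw [← hih]
      apply List.map_congr_left
      intro k _
      simp only [Function.comp, List.drop_drop]
      congr 2
      omega

lemma pyRangeB (rest : List Int) :
    PySem.List.pyRange 0 (rest.length : Int) 4
      = (List.range (cnt4 rest.length)).map (fun k => ((4 * k : Nat) : Int)) := by
  rw [PySem.List.pyRange_of_pos 0 (rest.length : Int) (by norm_num)]
  by_cases h : rest.length = 0
  · simp [h, cnt4_zero]
  · have hlt : (0 : Int) < (rest.length : Int) := by exact_mod_cast Nat.pos_of_ne_zero h
    rw [if_pos hlt]
    have : ((rest.length : Int) - 0 + 4 - 1) / 4 = ((cnt4 rest.length : Nat) : Int) := by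
      unfold cnt4
      push_cast
      congr 1
      omega
    rw [this, Int.toNat_natCast]
    congr 1
    funext k
    push_cast
    ring

-- joining [a, join l] equals joining (a :: l) for nonempty l
lemma join_join (a : String) (l : List String) (h : l ≠ []) :
    PySem.Str.join "\n" [a, PySem.Str.join "\n" l] = PySem.Str.join "\n" (a :: l) := by
  apply String.toList_inj.mp
  obtain ⟨b, l', rfl⟩ := List.exists_cons_of_ne_nil h
  rw [PySem.Str.toList_join, PySem.Str.toList_join]
  simp only [List.map_cons, List.map_nil, PySem.Str.toList_join]
  rw [PySem.Chars.join_cons_cons, PySem.Chars.join_singleton, PySem.Chars.join_cons_cons]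

lemma join_singleton_str (a : String) : PySem.Str.join "\n" [a] = a := by
  apply String.toList_inj.mp
  rw [PySem.Str.toList_join]
  simp [PySem.Chars.join_singleton]

-- ===== VERDICT (by name: the statement is the Claim_ definition above) =====
theorem create_rbe2_str_spec : Claim_equal_create_rbe2_str := by
  intro rbe2_id grid_id_tar dof grid_ids _
  unfold Spec_create_rbe2_str create_rbe2_str create_rbe2_str_alt
  dsimp only
  have hrest : PySem.List.slice grid_ids (some 2) none = grid_ids.drop 2 := by
    rw [PySem.List.slice_from grid_ids (by norm_num : (0:Int) ≤ 2)]
    rfl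
  have htake : PySem.List.slice grid_ids none (some 2) = grid_ids.take 2 := by
    rw [PySem.List.slice_to grid_ids (by norm_num : (0:Int) ≤ 2)]
    rfl
  rw [hrest, htake]
  rw [PySem.List.foldl_append_singleton_eq_map
    (fun i => "+," ++ PySem.Str.join ","
      ((PySem.List.slice (grid_ids.drop 2) (some i) (some (i + 4))).map PySem.Int.toStr))]
  rw [pyRangeB (grid_ids.drop 2), List.map_map]
  have hmap : (List.range (cnt4 (grid_ids.drop 2).length)).map
      ((fun i => "+," ++ PySem.Str.join ","
        ((PySem.List.slice (grid_ids.drop 2) (some i) (some (i + 4))).map PySem.Int.toStr))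
        ∘ (fun k => ((4 * k : Nat) : Int)))
      = (chunks4 (grid_ids.drop 2)).map
          (fun c => "+," ++ PySem.Str.join "," (c.map PySem.Int.toStr)) := by
    rw [← sliceB (grid_ids.drop 2).length (grid_ids.drop 2) (le_refl _), List.map_map]
    apply List.map_congr_left
    intro k _
    simp only [Function.comp]
    congr 2
    rw [show ((4 * k : Nat) : Int) + 4 = ((4 * k : Nat) : Int) + ((4 : Nat) : Int) from by norm_num]
    rw [PySem.List.slice_natCast_add]
  rw [hmap]
  by_cases hlen : grid_ids.length > 2
  · rw [if_pos hlen]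
    have hrne : grid_ids.drop 2 ≠ [] := by
      intro hcon
      have := congrArg List.length hcon
      simp at this
      omega
    have hA : str_list_change "+," (grid_ids.drop 2) 4
        = PySem.Str.join "\n"
            ((chunks4 (grid_ids.drop 2)).map
              (fun c => "+," ++ PySem.Str.join "," (c.map PySem.Int.toStr))) := by
      unfold str_list_change
      have hsame : (fun (s : Bool × List Int × List (List Int)) (p : Int × Int) =>
          if PySem.Int.mod p.1 4 = 0 then
            if s.1 then (false, [p.2], s.2.2)
            else (false, [p.2], s.2.2 ++ [s.2.1])
          else (s.1, s.2.1 ++ [p.2], s.2.2)) = stepA := rfl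
      rw [hsame]
      have hl := loopA (grid_ids.drop 2) hrne
      unfold outA at hl
      dsimp only
      rw [hl]
    rw [hA]
    exact join_join _ _ (by rw [chunks4_ne_nil _ hrne]; simp)
  · rw [if_neg hlen]
    have hlen2 : grid_ids.length ≤ 2 := by omega
    have hrnil : grid_ids.drop 2 = [] := List.drop_eq_nil_of_le hlen2
    rw [hrnil]
    simp only [chunks4_nil, List.map_nil]
    rw [List.append_nil, join_singleton_str]
    rw [List.take_of_length_le hlen2]
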